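-- pv_equiv track=rewrite | github.com/nehemiahlc/DSA-practice | two_pointers/three_way_merge_without_duplicates.py | three_way_merge
-- ===== SOURCE A (Python) =====
-- def three_way_merge(arr1, arr2, arr3):
--   p1, p2, p3 = 0, 0, 0
--   res = []
--   while p1 < len(arr1) or p2 < len(arr2) or p3 < len(arr3):
--     # Find the smallest value among current positions
--     min_val = float('inf')
--     if p1 < len(arr1):
--       min_val = min(min_val, arr1[p1])
--     if p2 < len(arr2):
--       min_val = min(min_val, arr2[p2])
--     if p3 < len(arr3):
--       min_val = min(min_val, arr3[p3])
--
--     # Skip duplicates of min_val in all arrays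
--     if p1 < len(arr1) and arr1[p1] == min_val:
--       p1 += 1
--     if p2 < len(arr2) and arr2[p2] == min_val:
--       p2 += 1
--     if p3 < len(arr3) and arr3[p3] == min_val:
--       p3 += 1
--
--     # Only add if we haven't added this value before
--     if not res or res[-1] != min_val:
--       res.append(min_val)
--
--   return res
-- ===== SOURCE B (Python) =====
-- def three_way_merge(arr1, arr2, arr3):
--     # Pairwise decomposition: merge2 is a stepwise-min two-pointer merge that
--     # advances every pointer whose head equals the current min (keeping one copy
--     # per step); it is associative, so two nested merge2 calls reproduce the
--     # three-pointer min stream, and a final adjacent-dedup pass gives the result.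
--     def merge2(a, b):
--         i, j, out = 0, 0, []
--         while i < len(a) or j < len(b):
--             if j >= len(b) or (i < len(a) and a[i] <= b[j]):
--                 m = a[i]
--             else:
--                 m = b[j]
--             if i < len(a) and a[i] == m:
--                 i += 1
--             if j < len(b) and b[j] == m:
--                 j += 1
--             out.append(m)
--         return out
--
--     res = []
--     for v in merge2(merge2(arr1, arr2), arr3):
--         if not res or res[-1] != v:
--             res.append(v)
--     return res
-- ===== Notes on version B (the rewrite author's own statement) =====
-- stated objective: alternative
-- what changed: Replaced A's single three-pointer pass with two nested pairwise stepwise-min merges (advancing every pointer whose head equals the current minimum, kept duplicate-free only adjacently by a separate final dedup pass); the pairwise merge is associative so the composition reproduces A's min stream exactly, even on unsorted input.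
import Mathlib
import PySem

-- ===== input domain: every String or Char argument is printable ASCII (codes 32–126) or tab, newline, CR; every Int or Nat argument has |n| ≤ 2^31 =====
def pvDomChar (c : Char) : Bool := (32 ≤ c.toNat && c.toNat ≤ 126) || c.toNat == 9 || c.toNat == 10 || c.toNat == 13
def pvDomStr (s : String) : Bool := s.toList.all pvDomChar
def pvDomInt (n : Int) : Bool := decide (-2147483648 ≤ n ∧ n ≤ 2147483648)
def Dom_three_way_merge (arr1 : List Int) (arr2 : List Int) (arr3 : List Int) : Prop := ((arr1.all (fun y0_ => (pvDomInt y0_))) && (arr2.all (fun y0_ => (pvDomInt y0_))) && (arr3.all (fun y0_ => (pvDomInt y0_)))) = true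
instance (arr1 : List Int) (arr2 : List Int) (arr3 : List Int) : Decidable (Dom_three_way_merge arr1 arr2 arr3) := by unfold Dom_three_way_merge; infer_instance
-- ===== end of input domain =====

-- B replaces A's single three-pointer pass by nested pairwise stepwise-min merges plus a
-- final adjacent-dedup pass (objective: alternative decomposition, same asymptotic cost).

-- ===== PORT A =====
-- `if p < len(arr) ...` on the suffix s: head present.  Advance = drop head when it equals m.
def pvAdv (m : Int) (s : List Int) : List Int := if s.head? = some m then s.tail else s

-- Python's `min_val = float('inf'); if ...: min_val = min(min_val, head)` thrice: the minimum
-- of the present heads.  The `0` default is never used by the loop (some list is nonempty there);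
-- it replaces the unreachable `inf`, which has no Int counterpart — exact on every reached state.
def pvMinHeads (s1 s2 s3 : List Int) : Int :=
  match s1.head?.toList ++ s2.head?.toList ++ s3.head?.toList with
  | [] => 0
  | x :: xs => xs.foldl min x

theorem pvAdv_length_le (m : Int) (s : List Int) : (pvAdv m s).length ≤ s.length := by
  unfold pvAdv; split <;> cases s <;> simp_all

theorem pvMinHeads_hits (s1 s2 s3 : List Int) (h : ¬(s1 = [] ∧ s2 = [] ∧ s3 = [])) :
    s1.head? = some (pvMinHeads s1 s2 s3) ∨ s2.head? = some (pvMinHeads s1 s2 s3) ∨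
    s3.head? = some (pvMinHeads s1 s2 s3) := by
  unfold pvMinHeads
  cases s1 with
  | nil => cases s2 with
    | nil => cases s3 with
      | nil => simp at h
      | cons z zs => simp
    | cons y ys => cases s3 with
      | cons z zs =>
        simp only [List.head?_cons, Option.toList_some]
        rcases min_choice y z with h' | h' <;> simp [h']
      | nil => simp
  | cons x xs => cases s2 with
    | nil => cases s3 with
      | cons z zs =>
        simp only [List.head?_cons, Option.toList_some,
          List.nil_append, List.cons_append]
        rcases min_choice x z with h' | h' <;> simp [h']
      | nil => simp
    | cons y ys => cases s3 with
      | nil =>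
        simp only [List.head?_cons, Option.toList_some,
          List.nil_append, List.cons_append, List.foldl]
        rcases min_choice x y with h' | h' <;> simp [h']
      | cons z zs =>
        simp only [List.head?_cons, Option.toList_some,
          List.nil_append, List.cons_append, List.foldl]
        rcases min_choice (min x y) z with h' | h'
        · rcases min_choice x y with h'' | h'' <;> rw [h'] <;> simp [h'']
        · simp [h']

theorem pvAdv_length_lt (m : Int) (s : List Int) (hh : s.head? = some m) :
    (pvAdv m s).length < s.length := by
  cases s with
  | nil => simp at hh
  | cons x xs => simp only [List.head?_cons] at hh; simp [pvAdv, hh]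

theorem pvAdv_dec (s1 s2 s3 : List Int) (h : ¬(s1 = [] ∧ s2 = [] ∧ s3 = [])) :
    (pvAdv (pvMinHeads s1 s2 s3) s1).length + (pvAdv (pvMinHeads s1 s2 s3) s2).length +
      (pvAdv (pvMinHeads s1 s2 s3) s3).length < s1.length + s2.length + s3.length := by
  have h1 := pvAdv_length_le (pvMinHeads s1 s2 s3) s1
  have h2 := pvAdv_length_le (pvMinHeads s1 s2 s3) s2
  have h3 := pvAdv_length_le (pvMinHeads s1 s2 s3) s3
  rcases pvMinHeads_hits s1 s2 s3 h with hh | hh | hh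
  · have := pvAdv_length_lt _ _ hh; omega
  · have := pvAdv_length_lt _ _ hh; omega
  · have := pvAdv_length_lt _ _ hh; omega

-- A's while loop: state = the three unread suffixes and the accumulated `res`.
def pvMerge3Go (s1 s2 s3 res : List Int) : List Int :=
  if _h : s1 = [] ∧ s2 = [] ∧ s3 = [] then res
  else
    let m := pvMinHeads s1 s2 s3
    pvMerge3Go (pvAdv m s1) (pvAdv m s2) (pvAdv m s3)
      (if res = [] ∨ res.getLast? ≠ some m then res ++ [m] else res)
termination_by s1.length + s2.length + s3.length
decreasing_by exact pvAdv_dec s1 s2 s3 _h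

def three_way_merge (arr1 : List Int) (arr2 : List Int) (arr3 : List Int) : List Int :=
  pvMerge3Go arr1 arr2 arr3 []

-- ===== PORT B =====
-- Source B's merge2: two pointers over a and b = structural recursion on the two suffixes.
def pvMerge2 : List Int → List Int → List Int
  | [], [] => []
  | [], y :: ys => y :: pvMerge2 [] ys
  | x :: xs, [] => x :: pvMerge2 xs []
  | x :: xs, y :: ys =>
    if x ≤ y then
      if y = x then x :: pvMerge2 xs ys else x :: pvMerge2 xs (y :: ys)
    else y :: pvMerge2 (x :: xs) ys
termination_by a b => a.length + b.length

-- Source B's final adjacent-dedup loop.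
def pvDedupStep (r : List Int) (v : Int) : List Int :=
  if r = [] ∨ r.getLast? ≠ some v then r ++ [v] else r

def three_way_merge_alt (arr1 : List Int) (arr2 : List Int) (arr3 : List Int) : List Int :=
  (pvMerge2 (pvMerge2 arr1 arr2) arr3).foldl pvDedupStep []

-- ===== PRECONDITION & SPEC =====
def Spec_three_way_merge (arr1 : List Int) (arr2 : List Int) (arr3 : List Int) (out : List Int) : Prop := out = three_way_merge_alt arr1 arr2 arr3
instance (arr1 : List Int) (arr2 : List Int) (arr3 : List Int) (out : List Int) : Decidable (Spec_three_way_merge arr1 arr2 arr3 out) := by unfold Spec_three_way_merge; infer_instance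

-- ===== CLAIM (what is proved, stated in full; the proofs are below) =====
def Claim_equal_three_way_merge : Prop := ∀ (arr1 : List Int) (arr2 : List Int) (arr3 : List Int), Dom_three_way_merge arr1 arr2 arr3 → Spec_three_way_merge arr1 arr2 arr3 (three_way_merge arr1 arr2 arr3)

-- ===== LEMMAS AND PROOFS =====

-- The raw min stream of A's loop (proof device: A = dedup-fold over it, B's nested merges equal it).
def pvStream3 (s1 s2 s3 : List Int) : List Int :=
  if _h : s1 = [] ∧ s2 = [] ∧ s3 = [] then []
  else
    let m := pvMinHeads s1 s2 s3
    m :: pvStream3 (pvAdv m s1) (pvAdv m s2) (pvAdv m s3)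
termination_by s1.length + s2.length + s3.length
decreasing_by exact pvAdv_dec s1 s2 s3 _h

theorem merge3go_eq_foldl (s1 s2 s3 res : List Int) :
    pvMerge3Go s1 s2 s3 res = (pvStream3 s1 s2 s3).foldl pvDedupStep res := by
  induction s1, s2, s3, res using pvMerge3Go.induct with
  | case1 s1 s2 s3 res h => rw [pvMerge3Go, pvStream3]; simp [h]
  | case2 s1 s2 s3 res h m ih =>
    rw [pvMerge3Go, pvStream3]
    simp only [h, dif_neg, not_false_iff, List.foldl_cons]
    exact ih

theorem merge2_nil_left (c : List Int) : pvMerge2 [] c = c := by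
  induction c with
  | nil => rw [pvMerge2]
  | cons z zs ih => rw [pvMerge2, ih]

theorem stream3_nil_nil (c : List Int) : pvStream3 [] [] c = c := by
  induction c with
  | nil => rw [pvStream3]; simp
  | cons z zs ih =>
    rw [pvStream3]
    simp [pvMinHeads, pvAdv, ih]

-- One step of merge2 on a non-empty pair: emit the min of the heads, advance matching heads.
theorem merge2_step (a b : List Int) (h : ¬(a = [] ∧ b = [])) :
    pvMerge2 a b = pvMinHeads a b [] ::
      pvMerge2 (pvAdv (pvMinHeads a b []) a) (pvAdv (pvMinHeads a b []) b) := by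
  cases a with
  | nil => cases b with
    | nil => simp at h
    | cons y ys => simp [pvMerge2, pvMinHeads, pvAdv]
  | cons x xs => cases b with
    | nil => simp [pvMerge2, pvMinHeads, pvAdv]
    | cons y ys =>
      have hm : pvMinHeads (x :: xs) (y :: ys) [] = min x y := by
        simp [pvMinHeads]
      rw [pvMerge2, hm]
      by_cases hxy : x ≤ y
      · have : min x y = x := min_eq_left hxy
        rw [this]
        by_cases hyx : y = x
        · simp [hyx, pvAdv]
        · simp [hxy, hyx, pvAdv]
      · have hlt : y < x := lt_of_not_ge hxy
        have : min x y = y := min_eq_right (le_of_lt hlt)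
        rw [this]
        have hne : x ≠ y := ne_of_gt hlt
        simp [hxy, pvAdv, hne]

theorem minHeads2_le_head1 (x : Int) (xs b : List Int) :
    pvMinHeads (x :: xs) b [] ≤ x := by
  cases b <;> simp [pvMinHeads]

theorem minHeads2_le_head2 (a : List Int) (y : Int) (ys : List Int) :
    pvMinHeads a (y :: ys) [] ≤ y := by
  cases a <;> simp [pvMinHeads]

theorem minHeads_extend (a b : List Int) (z : Int) (zs : List Int)
    (h : ¬(a = [] ∧ b = [])) :
    pvMinHeads a b (z :: zs) = min (pvMinHeads a b []) z := by
  cases a with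
  | nil => cases b with
    | nil => simp at h
    | cons y ys => simp [pvMinHeads]
  | cons x xs => cases b with
    | nil => simp [pvMinHeads]
    | cons y ys => simp [pvMinHeads]

theorem merge2_dec (a b : List Int) (h : ¬(a = [] ∧ b = [])) :
    (pvAdv (pvMinHeads a b []) a).length + (pvAdv (pvMinHeads a b []) b).length <
      a.length + b.length := by
  have h1 := pvAdv_length_le (pvMinHeads a b []) a
  have h2 := pvAdv_length_le (pvMinHeads a b []) b
  have := pvAdv_dec a b [] (by simpa using h)
  simpa [pvAdv] using this

-- Associativity of the stepwise-min merge: the nested pairwise merges produce A's min stream.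
theorem merge2_merge2_eq_stream3 (a b c : List Int) :
    pvMerge2 (pvMerge2 a b) c = pvStream3 a b c := by
  by_cases hab : a = [] ∧ b = []
  · rcases hab with ⟨rfl, rfl⟩
    rw [merge2_nil_left, merge2_nil_left, stream3_nil_nil]
  · have hne : ∀ c' : List Int, ¬(a = [] ∧ b = [] ∧ c' = []) := by
      intro c' hcon; exact hab ⟨hcon.1, hcon.2.1⟩
    cases c with
    | nil =>
      rw [merge2_step a b hab, pvMerge2, pvStream3, dif_neg (hne [])]
      simp only []
      rw [show pvAdv (pvMinHeads a b []) ([] : List Int) = [] by simp [pvAdv]]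
      exact congrArg _ (merge2_merge2_eq_stream3 _ _ [])
    | cons z zs =>
      rw [merge2_step a b hab, pvStream3, dif_neg (hne (z :: zs)),
        minHeads_extend a b z zs hab, pvMerge2]
      simp only []
      by_cases hle : pvMinHeads a b [] ≤ z
      · rw [min_eq_left hle, if_pos hle]
        by_cases hz : z = pvMinHeads a b []
        · rw [if_pos hz]
          rw [show pvAdv (pvMinHeads a b []) (z :: zs) = zs by simp [pvAdv, hz]]
          exact congrArg _ (merge2_merge2_eq_stream3 _ _ zs)
        · rw [if_neg hz]
          rw [show pvAdv (pvMinHeads a b []) (z :: zs) = z :: zs by simp [pvAdv, hz]]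
          exact congrArg _ (merge2_merge2_eq_stream3 _ _ (z :: zs))
      · have hlt : z < pvMinHeads a b [] := lt_of_not_ge hle
        rw [min_eq_right (le_of_lt hlt), if_neg hle]
        have ha : pvAdv z a = a := by
          cases a with
          | nil => simp [pvAdv]
          | cons x xs =>
            have h1 := minHeads2_le_head1 x xs b
            have hx : x ≠ z := by omega
            simp [pvAdv, hx]
        have hb : pvAdv z b = b := by
          cases b with
          | nil => simp [pvAdv]
          | cons y ys =>
            have h1 := minHeads2_le_head2 a y ys
            have hy : y ≠ z := by omega
            simp [pvAdv, hy]
        rw [show pvAdv z (z :: zs) = zs by simp [pvAdv], ha, hb, ← merge2_step a b hab]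
        exact congrArg _ (merge2_merge2_eq_stream3 a b zs)
termination_by a.length + b.length + c.length
decreasing_by
  all_goals simp only [List.length_nil, List.length_cons]
  · have := merge2_dec a b hab; omega
  · have := merge2_dec a b hab; omega
  · have := merge2_dec a b hab; omega
  · omega

-- ===== VERDICT (by name: the statement is the Claim_ definition above) =====
theorem three_way_merge_spec : Claim_equal_three_way_merge := by
  intro arr1 arr2 arr3 _
  show three_way_merge arr1 arr2 arr3 = three_way_merge_alt arr1 arr2 arr3
  rw [three_way_merge, three_way_merge_alt, merge3go_eq_foldl,
    merge2_merge2_eq_stream3]
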